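-- pv_equiv track=rewrite | github.com/danghoangnhan/TensorflowCertificate | assignment/danieldu_midterm.py | getDx
-- ===== SOURCE A (Python) =====
-- def getDx(A,b,cols):
--     result = [[0 for _ in range(len(A[0]))] for _ in range(len(A))]
--
--     for i in range(len(A)):
--         for j in range(len(A[0])):
--             if j == cols-1:
--                 result[i][j] = b[0][i]
--             else:
--                 result[i][j] = A[i][j]
--     return result
-- ===== SOURCE B (Python) =====
-- def getDx(A, b, cols):
--     n = len(A)
--     columns = [list(col) for col in zip(*A)]   # column-major view of A
--     j = cols - 1
--     if 0 <= j < len(columns):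
--         columns[j] = list(b[0][:n])            # replace one row of the transpose
--     return [[col[i] for col in columns] for i in range(n)]
-- ===== Notes on version B (the rewrite author's own statement) =====
-- stated objective: alternative
-- what changed: B works column-major: it transposes A with zip(*A), replaces the single row cols-1 of the transpose by b[0][:n] under a range guard, and transposes back, instead of A's element-wise double loop with a per-cell branch.
-- outside the precondition, e.g. on getDx([[1, 2], [3]], [[7, 8]], 2): A returns [[1, 7], [3, 8]], B returns [[1], [3]]
import Mathlib
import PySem

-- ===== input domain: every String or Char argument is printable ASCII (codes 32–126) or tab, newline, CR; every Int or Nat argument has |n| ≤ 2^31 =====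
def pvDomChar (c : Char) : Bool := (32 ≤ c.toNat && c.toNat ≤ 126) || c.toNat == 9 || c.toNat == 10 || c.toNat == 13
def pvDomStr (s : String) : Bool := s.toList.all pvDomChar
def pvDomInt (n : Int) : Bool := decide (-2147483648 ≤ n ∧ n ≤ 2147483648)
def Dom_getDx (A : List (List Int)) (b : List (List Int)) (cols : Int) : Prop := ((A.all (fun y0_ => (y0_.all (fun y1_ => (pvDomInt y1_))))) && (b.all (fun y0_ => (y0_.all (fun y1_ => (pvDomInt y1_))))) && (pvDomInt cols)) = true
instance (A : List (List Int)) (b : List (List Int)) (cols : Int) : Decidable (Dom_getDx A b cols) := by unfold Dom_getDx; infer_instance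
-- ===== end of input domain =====

-- B is column-major: transpose A (zip(*A)), replace row cols-1 of the transpose by b[0][:n]
-- under a range guard, transpose back; A fills a fresh matrix cell by cell with a per-cell branch.

-- ===== PORT A =====
-- nested index loops filling a fresh matrix cell by cell, branching per cell
def getDx (A : List (List Int)) (b : List (List Int)) (cols : Int) : List (List Int) :=
  (PySem.List.pyRange 0 A.length 1).map (fun i =>
    (PySem.List.pyRange 0 ((PySem.List.pyGetD A 0 []).length : Int) 1).map (fun j =>
      if j = cols - 1 then PySem.List.pyGetD (PySem.List.pyGetD b 0 []) i 0
      else PySem.List.pyGetD (PySem.List.pyGetD A i []) j 0))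

-- ===== PORT B =====
-- hand port of [list(col) for col in zip(*A)]: zip(*A) yields min-row-length tuples,
-- tuple i holding row[i] of every row; exact since every accessed index is < every row length
def pvZipStar (xs : List (List Int)) : List (List Int) :=
  match xs with
  | [] => []
  | r :: rest =>
    (List.range ((rest.map List.length).foldl min r.length)).map
      (fun i => (r :: rest).map (fun row => row.getD i 0))

def getDx_alt (A : List (List Int)) (b : List (List Int)) (cols : Int) : List (List Int) :=
  let n := A.length
  let columns := pvZipStar A
  let j := cols - 1
  let columns' :=
    if 0 ≤ j ∧ j < (columns.length : Int) then
      columns.set j.toNat (PySem.List.slice (PySem.List.pyGetD b 0 []) none (some (n : Int)))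
    else columns
  -- [[col[i] for col in columns] for i in range(n)]; col[i] exact: every kept column has length ≥ n on Pre_
  (List.range n).map (fun (i : Nat) => columns'.map (fun col => PySem.List.pyGetD col (i : Int) 0))

-- ===== PRECONDITION & SPEC =====
-- Pre_ restricts to the natural matrix domain (every row at least as long as the first row) and,
-- when column cols-1 is in range, requires b[0] to exist and cover all rows: outside this A raises
-- IndexError except in the accidental ragged corner where the only missing cell index equals cols-1
-- (A then still substitutes from b while B's zip truncates) — that corner is excluded, not matched.
def Pre_getDx (A : List (List Int)) (b : List (List Int)) (cols : Int) : Prop :=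
  (∀ row ∈ A, (A.headD []).length ≤ row.length) ∧
  ((0 ≤ cols - 1 ∧ cols - 1 < ((A.headD []).length : Int)) → b ≠ [] ∧ A.length ≤ (b.headD []).length)
instance (A : List (List Int)) (b : List (List Int)) (cols : Int) : Decidable (Pre_getDx A b cols) := by unfold Pre_getDx; infer_instance

def pvWitness_getDx : List (List Int) × List (List Int) × Int := ([[1, 2], [3, 4]], [[7, 8]], 2)

def Spec_getDx (A : List (List Int)) (b : List (List Int)) (cols : Int) (out : List (List Int)) : Prop := out = getDx_alt A b cols
instance (A : List (List Int)) (b : List (List Int)) (cols : Int) (out : List (List Int)) : Decidable (Spec_getDx A b cols out) := by unfold Spec_getDx; infer_instance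

-- ===== CLAIM (what is proved, stated in full; the proofs are below) =====
def Claim_equal_getDx : Prop := ∀ (A : List (List Int)) (b : List (List Int)) (cols : Int), Dom_getDx A b cols → Pre_getDx A b cols → Spec_getDx A b cols (getDx A b cols)

-- ===== LEMMAS AND PROOFS =====

theorem foldl_min_const (ls : List Nat) (w : Nat) (h : ∀ l ∈ ls, w ≤ l) :
    ls.foldl min w = w := by
  induction ls with
  | nil => rfl
  | cons a t ih =>
    have : min w a = w := by
      have := h a (by simp)
      omega
    simp only [List.foldl_cons, this]
    exact ih (fun l hl => h l (by simp [hl]))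

theorem getD_take_eq (l : List Int) (n i : Nat) (h : i < n) :
    (l.take n).getD i 0 = l.getD i 0 := by
  induction l generalizing n i with
  | nil => simp
  | cons a t ih =>
    cases n with
    | zero => omega
    | succ m =>
      cases i with
      | zero => simp
      | succ k => simpa using ih m k (by omega)

theorem getD_map_getElem (L : List (List Int)) (f : List Int → Int) (i : Nat)
    (h : i < L.length) : (L.map f).getD i 0 = f (L[i]'h) := by
  rw [List.getD_eq_getElem (L.map f) 0 (by simpa using h), List.getElem_map]

theorem getDx_spec_aux (A : List (List Int)) (b : List (List Int)) (cols : Int)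
    (hrows : ∀ row ∈ A, (A.headD []).length ≤ row.length)
    (hb : (0 ≤ cols - 1 ∧ cols - 1 < ((A.headD []).length : Int)) →
      b ≠ [] ∧ A.length ≤ (b.headD []).length) :
    getDx A b cols = getDx_alt A b cols := by
  cases A with
  | nil =>
    simp [getDx, getDx_alt, pvZipStar, PySem.List.pyRange]
  | cons r rest =>
    have hmin : (rest.map List.length).foldl min r.length = r.length := by
      apply foldl_min_const
      intro l hl
      obtain ⟨row, hrow, rfl⟩ := List.mem_map.mp hl
      simpa using hrows row (by simp [hrow])
    have hcols : pvZipStar (r :: rest)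
        = (List.range r.length).map (fun i => (r :: rest).map (fun row => row.getD i 0)) := by
      simp only [pvZipStar, hmin]
    have hhead : PySem.List.pyGetD (r :: rest) 0 [] = r := PySem.List.pyGetD_zero_cons _ _ _
    unfold getDx getDx_alt
    simp only [hhead, hcols, PySem.List.pyRange_zero_natCast, List.map_map,
      List.length_map, List.length_range]
    apply List.ext_getElem
    · by_cases hc : 0 ≤ cols - 1 ∧ cols - 1 < (r.length : Int) <;> simp [hc]
    · intro i h1 h2
      have hi : i < (r :: rest).length := by simpa using h1
      have hAi : PySem.List.pyGetD (r :: rest) (i : Int) [] = (r :: rest)[i]'hi := by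
        rw [PySem.List.pyGetD_natCast]; exact List.getD_eq_getElem _ _ _
      simp only [List.getElem_map, List.getElem_range, Function.comp_apply, hAi]
      by_cases hc : 0 ≤ cols - 1 ∧ cols - 1 < (r.length : Int)
      · rw [if_pos hc]
        apply List.ext_getElem
        · simp
        · intro j hj1 hj2
          have hjw : j < r.length := by simpa using hj1
          simp only [List.getElem_map, Function.comp_apply, List.getElem_range, List.getElem_set]
          by_cases he : (j : Int) = cols - 1
          · have ht : (cols - 1).toNat = j := by omega
            rw [if_pos he, if_pos ht, PySem.List.slice_to_natCast, PySem.List.pyGetD_natCast,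
              PySem.List.pyGetD_natCast]
            rw [getD_take_eq _ _ _ hi]
          · have ht : ¬ (cols - 1).toNat = j := by omega
            rw [if_neg he, if_neg ht, PySem.List.pyGetD_natCast, PySem.List.pyGetD_natCast]
            rw [getD_map_getElem _ _ _ hi]
      · rw [if_neg hc]
        apply List.ext_getElem
        · simp
        · intro j hj1 hj2
          have hjw : j < r.length := by simpa using hj1
          simp only [List.getElem_map, Function.comp_apply, List.getElem_range]
          have he : ¬ (j : Int) = cols - 1 := by omega
          rw [if_neg he, PySem.List.pyGetD_natCast, PySem.List.pyGetD_natCast]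
          rw [getD_map_getElem _ _ _ hi]

-- ===== VERDICT (by name: the statement is the Claim_ definition above) =====
theorem getDx_spec : Claim_equal_getDx := by
  intro A b cols _ hpre
  unfold Spec_getDx
  exact getDx_spec_aux A b cols hpre.1 hpre.2
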